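-- pv_equiv track=rewrite | github.com/FelixWolf/libfurc | libfurc/base.py | b220decode
-- ===== SOURCE A (Python) =====
-- def b220decode(data):
--     out = 0
--     i = 1
--     for c in data:
--         if c >= 35 and c < 255:
--             out = out + ((c - 35) * i)
--             i *= 220
--         else:
--             raise ValueError("Invalid base220 character!")
--     return out
-- ===== SOURCE B (Python) =====
-- def b220decode(data):
--     out = 0
--     for c in reversed(data):
--         if not (35 <= c < 255):
--             raise ValueError("Invalid base220 character!")
--         out = out * 220 + (c - 35)
--     return out
-- ===== Notes on version B (the rewrite author's own statement) =====
-- stated objective: simpler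
-- what changed: B replaces A's forward pass with an explicit positional multiplier i by Horner's method over the reversed sequence (out = out*220 + digit), eliminating the second running product.
import Mathlib
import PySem

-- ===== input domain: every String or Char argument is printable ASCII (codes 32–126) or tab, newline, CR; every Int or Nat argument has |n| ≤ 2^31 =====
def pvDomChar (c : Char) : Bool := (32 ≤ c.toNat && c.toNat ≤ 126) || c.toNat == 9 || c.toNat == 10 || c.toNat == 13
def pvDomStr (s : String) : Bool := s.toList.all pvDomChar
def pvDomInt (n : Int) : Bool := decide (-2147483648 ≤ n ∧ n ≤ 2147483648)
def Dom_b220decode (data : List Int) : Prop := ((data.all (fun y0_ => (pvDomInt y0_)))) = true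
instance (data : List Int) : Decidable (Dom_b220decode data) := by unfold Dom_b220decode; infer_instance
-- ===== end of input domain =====

-- ===== PORT A =====
-- Port of A: fold carrying (out, i); the raising branch lies outside Pre_ (both programs raise ValueError there).
def b220decode (data : List Int) : Int :=
  (data.foldl (fun (s : Int × Int) c => (s.1 + (c - 35) * s.2, s.2 * 220)) (0, 1)).1

-- ===== PORT B =====
-- Port of B: Horner's method over the reversed list.
def b220decode_alt (data : List Int) : Int :=
  data.reverse.foldl (fun out c => out * 220 + (c - 35)) 0

-- ===== PRECONDITION & SPEC =====
-- Pre_ excludes inputs containing a byte outside [35, 255), on which both A and B raise ValueError.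
def Pre_b220decode (data : List Int) : Prop := ∀ c ∈ data, 35 ≤ c ∧ c < 255
instance (data : List Int) : Decidable (Pre_b220decode data) := by unfold Pre_b220decode; infer_instance
def pvWitness_b220decode : List Int := [36, 40, 254]
def Spec_b220decode (data : List Int) (out : Int) : Prop := out = b220decode_alt data
instance (data : List Int) (out : Int) : Decidable (Spec_b220decode data out) := by unfold Spec_b220decode; infer_instance

-- ===== CLAIM (what is proved, stated in full; the proofs are below) =====
def Claim_equal_b220decode : Prop := ∀ (data : List Int), Dom_b220decode data → Pre_b220decode data → Spec_b220decode data (b220decode data)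

-- ===== LEMMAS AND PROOFS =====

theorem b220_foldl_key (data : List Int) : ∀ (out i : Int),
    (data.foldl (fun (s : Int × Int) c => (s.1 + (c - 35) * s.2, s.2 * 220)) (out, i)).1
      = out + i * data.foldr (fun c acc => acc * 220 + (c - 35)) 0 := by
  induction data with
  | nil => intro out i; simp
  | cons c t ih =>
      intro out i
      simp only [List.foldl, List.foldr, ih]
      ring

-- ===== VERDICT (by name: the statement is the Claim_ definition above) =====
theorem b220decode_spec : Claim_equal_b220decode := by
  intro data _ _
  unfold Spec_b220decode b220decode b220decode_alt
  rw [List.foldl_reverse, b220_foldl_key]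
  ring
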